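-- pv_equiv track=rewrite | github.com/kstoreyf/gethypercube | gethypercube/nested_lhd/utils.py | m_layers_from_rennen
-- ===== SOURCE A (Python) =====
-- def m_layers_from_rennen(m_init: int, n_layers: int, ratio: int) -> list[int]:
--     """
--     Compute Rennen-valid m_layers from initial size, number of layers, and ratio.
--
--     m_layers[i] = (m_init - 1) * ratio^i + 1 for i = 0 .. n_layers-1,
--     so (n_{i+1}-1) / (n_i-1) = ratio for all consecutive pairs.
--
--     Parameters
--     ----------
--     m_init : int
--         Smallest layer size (first element of m_layers). Must be >= 2.
--     n_layers : int
--         Number of layers. Must be >= 2.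
--     ratio : int
--         Integer ratio: (n_{i+1}-1) = (n_i-1) * ratio. Must be >= 2.
--
--     Returns
--     -------
--     list[int]
--         Strictly increasing list of layer sizes satisfying Rennen constraint.
--     """
--     if m_init < 2:
--         raise ValueError(f"m_init must be >= 2; got {m_init}")
--     if n_layers < 2:
--         raise ValueError(f"n_layers must be >= 2; got {n_layers}")
--     if ratio < 2:
--         raise ValueError(f"ratio must be >= 2; got {ratio}")
--     m_layers = []
--     n = m_init
--     for _ in range(n_layers):
--         m_layers.append(n)
--         n = (n - 1) * ratio + 1
--     return m_layers
-- ===== SOURCE B (Python) =====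
-- def m_layers_from_rennen(m_init: int, n_layers: int, ratio: int) -> list[int]:
--     if m_init < 2:
--         raise ValueError(f"m_init must be >= 2; got {m_init}")
--     if n_layers < 2:
--         raise ValueError(f"n_layers must be >= 2; got {n_layers}")
--     if ratio < 2:
--         raise ValueError(f"ratio must be >= 2; got {ratio}")
--     return [(m_init - 1) * ratio**i + 1 for i in range(n_layers)]
-- ===== Notes on version B (the rewrite author's own statement) =====
-- stated objective: alternative
-- what changed: Replaces the threaded recurrence n -> (n-1)*ratio+1 with an independent closed-form power (m_init-1)*ratio^i+1 per index.
import Mathlib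
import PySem

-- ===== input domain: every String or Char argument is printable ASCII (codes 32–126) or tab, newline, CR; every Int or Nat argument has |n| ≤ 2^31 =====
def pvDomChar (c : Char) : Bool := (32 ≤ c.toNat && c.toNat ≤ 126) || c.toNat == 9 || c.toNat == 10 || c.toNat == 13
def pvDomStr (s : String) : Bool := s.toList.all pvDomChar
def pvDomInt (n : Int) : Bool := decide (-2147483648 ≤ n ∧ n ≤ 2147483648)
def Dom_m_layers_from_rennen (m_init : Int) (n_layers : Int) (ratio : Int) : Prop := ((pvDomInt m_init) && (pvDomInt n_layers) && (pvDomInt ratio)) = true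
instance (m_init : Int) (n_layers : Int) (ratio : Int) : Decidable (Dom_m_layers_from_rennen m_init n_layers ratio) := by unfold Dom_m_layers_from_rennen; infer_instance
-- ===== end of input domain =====

-- B computes each layer size by the closed form (m_init-1)*ratio^i+1 instead of A's threaded
-- recurrence; same cost, different decomposition (objective: alternative).

-- ===== PORT A =====
-- for _ in range(n_layers): m_layers.append(n); n = (n-1)*ratio+1  — fuel = iteration count
def mLayersLoop (ratio : Int) : Nat → List Int → Int → List Int
  | 0, acc, _ => acc
  | k + 1, acc, n => mLayersLoop ratio k (acc ++ [n]) ((n - 1) * ratio + 1)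

def m_layers_from_rennen (m_init : Int) (n_layers : Int) (ratio : Int) : List Int :=
  if m_init < 2 then []          -- Python: raise ValueError (excluded by Pre_)
  else if n_layers < 2 then []   -- Python: raise ValueError (excluded by Pre_)
  else if ratio < 2 then []      -- Python: raise ValueError (excluded by Pre_)
  else mLayersLoop ratio n_layers.toNat [] m_init

-- ===== PORT B =====
def m_layers_from_rennen_alt (m_init : Int) (n_layers : Int) (ratio : Int) : List Int :=
  if m_init < 2 then []          -- Python: raise ValueError (excluded by Pre_)
  else if n_layers < 2 then []   -- Python: raise ValueError (excluded by Pre_)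
  else if ratio < 2 then []      -- Python: raise ValueError (excluded by Pre_)
  else (PySem.List.pyRange 0 n_layers 1).map (fun i => (m_init - 1) * ratio ^ i.toNat + 1)

-- ===== PRECONDITION & SPEC =====
-- A raises ValueError exactly when m_init < 2, n_layers < 2 or ratio < 2; Pre_ excludes those.
def Pre_m_layers_from_rennen (m_init : Int) (n_layers : Int) (ratio : Int) : Prop :=
  2 ≤ m_init ∧ 2 ≤ n_layers ∧ 2 ≤ ratio
instance (m_init : Int) (n_layers : Int) (ratio : Int) : Decidable (Pre_m_layers_from_rennen m_init n_layers ratio) := by unfold Pre_m_layers_from_rennen; infer_instance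

def pvWitness_m_layers_from_rennen : Int × Int × Int := (2, 3, 2)

def Spec_m_layers_from_rennen (m_init : Int) (n_layers : Int) (ratio : Int) (out : List Int) : Prop := out = m_layers_from_rennen_alt m_init n_layers ratio
instance (m_init : Int) (n_layers : Int) (ratio : Int) (out : List Int) : Decidable (Spec_m_layers_from_rennen m_init n_layers ratio out) := by unfold Spec_m_layers_from_rennen; infer_instance

-- ===== CLAIM (what is proved, stated in full; the proofs are below) =====
def Claim_equal_m_layers_from_rennen : Prop := ∀ (m_init : Int) (n_layers : Int) (ratio : Int), Dom_m_layers_from_rennen m_init n_layers ratio → Pre_m_layers_from_rennen m_init n_layers ratio → Spec_m_layers_from_rennen m_init n_layers ratio (m_layers_from_rennen m_init n_layers ratio)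

-- ===== LEMMAS AND PROOFS =====

-- The loop started at the closed-form value appends the closed-form tail.
theorem mLayersLoop_closed (r m : Int) :
    ∀ (k : Nat) (acc : List Int) (j : Nat),
      mLayersLoop r k acc ((m - 1) * r ^ j + 1)
        = acc ++ (List.range k).map (fun i => (m - 1) * r ^ (j + i) + 1) := by
  intro k
  induction k with
  | zero => intro acc j; simp [mLayersLoop]
  | succ k ih =>
    intro acc j
    have h : ((m - 1) * r ^ j + 1 - 1) * r + 1 = (m - 1) * r ^ (j + 1) + 1 := by ring
    rw [mLayersLoop, h, ih, List.range_succ_eq_map]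
    simp [List.map_map, Function.comp]
    intro a _
    left
    congr 1
    omega

theorem m_layers_from_rennen_spec : Claim_equal_m_layers_from_rennen := by
  intro m n r _ hpre
  obtain ⟨hm, hn, hr⟩ := hpre
  unfold Spec_m_layers_from_rennen m_layers_from_rennen m_layers_from_rennen_alt
  rw [if_neg (by omega), if_neg (by omega), if_neg (by omega),
      if_neg (by omega), if_neg (by omega), if_neg (by omega)]
  have hm0 : m = (m - 1) * r ^ (0 : Nat) + 1 := by ring
  rw [hm0, mLayersLoop_closed, PySem.List.pyRange_one]
  simp [List.map_map, Function.comp]
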